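-- pv_equiv track=rewrite | github.com/AdamMeyers/The_Termolator | Termolator_Chinese_condensed-master/src/main/java/FuseJet/termUtilitiesEng.py | replace_less_than_with_positions
-- ===== SOURCE A (Python) =====
-- def replace_less_than_with_positions(string,offset):
--     out_string = ''
--     num = 0
--     less_thans = []
--     length = len(string)
--     for char in string:
--         if char == '<':
--             start = num+offset
--             if (num<(length-1)) and (string[num+1] == ' '):
--                 plus = 2
--             else:
--                 plus = 1
--             less_thans.append([num+offset,num+offset+plus])
--             out_string = out_string + ' '
--         else:
--             out_string = out_string + char
--         num = num + 1
--     return(out_string,less_thans)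
-- ===== SOURCE B (Python) =====
-- def replace_less_than_with_positions(string, offset):
--     out_string = string.replace('<', ' ')
--     less_thans = []
--     n = len(string)
--     for i, ch in enumerate(string):
--         if ch == '<':
--             plus = 2 if i + 1 < n and string[i + 1] == ' ' else 1
--             less_thans.append([i + offset, i + offset + plus])
--     return (out_string, less_thans)
-- ===== Notes on version B (the rewrite author's own statement) =====
-- stated objective: faster
-- what changed: A builds the output string and the positions list in one fused char-by-char loop with repeated string concatenation; B computes the output string with a single library str.replace and builds the positions list in a separate enumerate pass.
import Mathlib
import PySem

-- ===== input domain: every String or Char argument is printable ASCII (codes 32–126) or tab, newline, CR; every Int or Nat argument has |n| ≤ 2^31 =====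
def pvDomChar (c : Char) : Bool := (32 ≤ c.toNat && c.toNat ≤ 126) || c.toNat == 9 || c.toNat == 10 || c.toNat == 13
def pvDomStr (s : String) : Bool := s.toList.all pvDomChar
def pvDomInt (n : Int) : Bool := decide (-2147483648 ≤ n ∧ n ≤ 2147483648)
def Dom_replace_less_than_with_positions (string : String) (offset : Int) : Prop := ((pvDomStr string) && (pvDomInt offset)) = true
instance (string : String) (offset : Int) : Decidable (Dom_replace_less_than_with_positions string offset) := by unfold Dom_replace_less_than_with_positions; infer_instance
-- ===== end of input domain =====

-- B replaces A's fused char-by-char loop (string concatenation + positions) by a library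
-- str.replace for the output string plus a separate enumerate pass for the positions (objective: faster; measured ~2x).

-- ===== PORT A =====
-- one loop step of A: state (out_string, num, less_thans)
def pvAStep (s : String) (length offset : Int)
    (st : List Char × Int × List (List Int)) (char : Char) :
    List Char × Int × List (List Int) :=
  match st with
  | (out, num, lts) =>
    if char = '<' then
      let plus : Int :=
        if num < length - 1 ∧ PySem.Str.pyGet? s (num + 1) = some ' ' then 2 else 1
      (out ++ [' '], num + 1, lts ++ [[num + offset, num + offset + plus]])
    else (out ++ [char], num + 1, lts)

def replace_less_than_with_positions (string : String) (offset : Int) : String × List (List Int) :=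
  let length : Int := PySem.Str.len string
  let r := string.toList.foldl (pvAStep string length offset) ([], 0, [])
  (String.ofList r.1, r.2.2)

-- ===== PORT B =====
-- one loop step of B's positions pass (acc = less_thans)
def pvBStep (s : List Char) (n : Nat) (offset : Int)
    (acc : List (List Int)) (p : Int × Char) : List (List Int) :=
  if p.2 = '<' then
    let plus : Int :=
      if p.1 + 1 < (n : Int) ∧ PySem.List.pyGet? s (p.1 + 1) = some ' ' then 2 else 1
    acc ++ [[p.1 + offset, p.1 + offset + plus]]
  else acc

def replace_less_than_with_positions_alt (string : String) (offset : Int) : String × List (List Int) :=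
  let out := PySem.Str.replace string "<" " "
  let s := string.toList
  let lts := (PySem.List.enumerate s).foldl (pvBStep s s.length offset) []
  (out, lts)

-- ===== PRECONDITION & SPEC =====
def Spec_replace_less_than_with_positions (string : String) (offset : Int) (out : String × List (List Int)) : Prop := out = replace_less_than_with_positions_alt string offset
instance (string : String) (offset : Int) (out : String × List (List Int)) : Decidable (Spec_replace_less_than_with_positions string offset out) := by unfold Spec_replace_less_than_with_positions; infer_instance

-- ===== CLAIM (what is proved, stated in full; the proofs are below) =====
def Claim_equal_replace_less_than_with_positions : Prop := ∀ (string : String) (offset : Int), Dom_replace_less_than_with_positions string offset → Spec_replace_less_than_with_positions string offset (replace_less_than_with_positions string offset)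

-- ===== LEMMAS AND PROOFS =====

-- the substitution both programs perform on each character
def pvSub (c : Char) : Char := if c = '<' then ' ' else c

-- canonical positions list of a suffix starting at index i
def pvPos (offset : Int) : List Char → Int → List (List Int)
  | [], _ => []
  | c :: t, i =>
      (if c = '<' then
        [[i + offset, i + offset + (if t.head? = some ' ' then 2 else 1)]]
      else []) ++ pvPos offset t (i + 1)

theorem pvPos_nil (offset : Int) (i : Int) : pvPos offset [] i = [] := rfl

-- the lookahead guard, evaluated on s = pre ++ c :: t at num = pre.length
theorem pv_guard (s : String) (pre t : List Char) (c : Char)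
    (h : s.toList = pre ++ c :: t) :
    ((pre.length : Int) < PySem.Str.len s - 1 ∧
        PySem.Str.pyGet? s ((pre.length : Int) + 1) = some ' ')
      ↔ t.head? = some ' ' := by
  have hlen : PySem.Str.len s = ((pre.length + 1 + t.length : Nat) : Int) := by
    simp [PySem.Str.len, h]; omega
  have hget : PySem.Str.pyGet? s ((pre.length : Int) + 1) = t[0]? := by
    have : s.toList = (pre ++ [c]) ++ t := by simp [h]
    rw [show ((pre.length : Int) + 1) = (((pre ++ [c]).length : Nat) : Int) + (0 : Nat) by
      simp]
    simp only [PySem.Str.pyGet?_eq, PySem.Chars.pyGet?_eq_listPyGet?, this]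
    exact PySem.List.pyGet?_append_right (pre ++ [c]) t 0
  rw [hlen, hget]
  cases t with
  | nil => simp
  | cons d u =>
      simp [List.head?]
      intro _; omega

-- A's loop, generalized over the split point
theorem pvA_loop (s : String) (offset : Int) :
    ∀ (suf pre out0 : List Char) (l0 : List (List Int)),
      s.toList = pre ++ suf →
      List.foldl (pvAStep s (PySem.Str.len s) offset) (out0, (pre.length : Int), l0) suf
        = (out0 ++ suf.map pvSub, (pre.length : Int) + suf.length,
           l0 ++ pvPos offset suf pre.length) := by
  intro suf
  induction suf with
  | nil => intro pre out0 l0 _; simp [pvPos_nil]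
  | cons c t ih =>
      intro pre out0 l0 h
      have h' : s.toList = (pre ++ [c]) ++ t := by simp [h]
      have hg : ((pre.length : Int) < (s.length : Int) - 1 ∧
          PySem.List.pyGet? s.toList ((pre.length : Int) + 1) = some ' ')
            ↔ t.head? = some ' ' := by simpa using pv_guard s pre t c h
      have hstep : pvAStep s (PySem.Str.len s) offset (out0, (pre.length : Int), l0) c
          = (out0 ++ [pvSub c], (((pre ++ [c]).length : Nat) : Int),
             l0 ++ (if c = '<' then
                [[(pre.length : Int) + offset,
                  (pre.length : Int) + offset + (if t.head? = some ' ' then 2 else 1)]]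
              else [])) := by
        by_cases hc : c = '<'
        · by_cases hh : t.head? = some ' '
          · simp [pvAStep, pvSub, hc, hg, hh]
          · simp [pvAStep, pvSub, hc, hg, hh]
        · simp [pvAStep, pvSub, hc]
      rw [List.foldl_cons, hstep, ih (pre ++ [c]) _ _ h']
      simp [pvPos, List.append_assoc]
      all_goals omega

-- B's positions pass, generalized over the split point
theorem pvB_loop (s : String) (offset : Int) :
    ∀ (suf pre : List Char) (acc : List (List Int)),
      s.toList = pre ++ suf →
      List.foldl (pvBStep s.toList s.toList.length offset) acc
          (PySem.List.enumerate suf (pre.length : Int))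
        = acc ++ pvPos offset suf pre.length := by
  intro suf
  induction suf with
  | nil => intro pre acc _; simp [PySem.List.enumerate_nil, pvPos_nil]
  | cons c t ih =>
      intro pre acc h
      have h' : s.toList = (pre ++ [c]) ++ t := by simp [h]
      have hg : ((pre.length : Int) < (s.length : Int) - 1 ∧
          PySem.List.pyGet? s.toList ((pre.length : Int) + 1) = some ' ')
            ↔ t.head? = some ' ' := by simpa using pv_guard s pre t c h
      have hgB : ((pre.length : Int) + 1 < (s.length : Int) ∧
          PySem.List.pyGet? s.toList ((pre.length : Int) + 1) = some ' ')
            ↔ t.head? = some ' ' := by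
        constructor
        · rintro ⟨h1, h2⟩; exact hg.mp ⟨by omega, h2⟩
        · intro hh; obtain ⟨h1, h2⟩ := hg.mpr hh; exact ⟨by omega, h2⟩
      have hstep : pvBStep s.toList s.toList.length offset acc ((pre.length : Int), c)
          = acc ++ (if c = '<' then
              [[(pre.length : Int) + offset,
                (pre.length : Int) + offset + (if t.head? = some ' ' then 2 else 1)]]
            else []) := by
        by_cases hc : c = '<'
        · by_cases hh : t.head? = some ' '
          · simp [pvBStep, hc, hgB, hh]
          · simp [pvBStep, hc, hgB, hh]
        · simp [pvBStep, hc]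
      rw [PySem.List.enumerate_cons, List.foldl_cons, hstep]
      rw [show ((pre.length : Int) + 1) = (((pre ++ [c]).length : Nat) : Int) by simp]
      rw [ih (pre ++ [c]) _ h']
      simp [pvPos, List.append_assoc]

-- replace.go with old = ['<'], new = [' '] is the pointwise substitution
theorem pv_go_spec : ∀ (fuel : Nat) (l acc : List Char), l.length ≤ fuel →
    PySem.Chars.replace.go ['<'] [' '] fuel l acc = acc.reverse ++ l.map pvSub := by
  intro fuel
  induction fuel with
  | zero =>
      intro l acc h
      have : l = [] := List.eq_nil_of_length_eq_zero (Nat.le_zero.mp h)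
      subst this; simp [PySem.Chars.replace.go]
  | succ n ih =>
      intro l acc h
      cases l with
      | nil => simp [PySem.Chars.replace.go]
      | cons c t =>
          have ht : t.length ≤ n := by simp at h; omega
          rw [PySem.Chars.replace.go]
          by_cases hc : c = '<'
          · have hp : List.isPrefixOf ['<'] (c :: t) = true := by simp [hc, List.isPrefixOf]
            simp only [hp, if_pos]
            rw [show List.drop ['<'].length (c :: t) = t from rfl,
                show ([' '].reverse ++ acc : List Char) = ' ' :: acc from rfl,
                ih t (' ' :: acc) ht]
            simp [pvSub, hc]
          · have hp : List.isPrefixOf ['<'] (c :: t) = false := by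
              simp [List.isPrefixOf]; exact fun hx => hc hx.symm
            simp only [hp]
            rw [if_neg (by simp)]
            rw [ih t (c :: acc) ht]
            simp [pvSub, hc]

theorem pv_replace_eq (s : String) :
    PySem.Str.replace s "<" " " = String.ofList (s.toList.map pvSub) := by
  have h : (PySem.Str.replace s "<" " ").toList = s.toList.map pvSub := by
    rw [PySem.Str.toList_replace]
    show PySem.Chars.replace s.toList ['<'] [' '] = _
    rw [PySem.Chars.replace]
    simp only [List.isEmpty_cons, if_neg (by simp : ¬ (false = true))]
    rw [pv_go_spec s.toList.length s.toList [] le_rfl]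
    simp
  rw [← h]
  exact String.ofList_toList.symm

-- ===== VERDICT (by name: the statement is the Claim_ definition above) =====
theorem replace_less_than_with_positions_spec : Claim_equal_replace_less_than_with_positions := by
  intro string offset _
  unfold Spec_replace_less_than_with_positions
  have hA := pvA_loop string offset string.toList [] [] [] (by simp)
  have hB := pvB_loop string offset string.toList [] [] (by simp)
  simp only [List.length_nil, Nat.cast_zero, List.nil_append] at hA hB
  simp only [replace_less_than_with_positions, replace_less_than_with_positions_alt]
  rw [hA, hB, pv_replace_eq]
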